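-- pv_equiv track=rewrite | github.com/sunghyouk/study_room | linalg_python/util.py | l_tri
-- ===== SOURCE A (Python) =====
-- def l_tri(A):
--     """
--     하 삼각 행렬 변환
--     입력값: 하 삼각 행렬로 변환하고자 하는 행렬 A
--     출력값: 행렬 A를 하 삼각 행렬로 변환시킨 행렬 ltri
--     """
--
--     n = len(A)
--     p = len(A[0])
--     ltri = []
--
--     for i in range(0, n):
--         row = []
--         for j in range(0, p):
--             if i < j:
--                 row.append(0)
--             else:
--                 row.append(A[i][j])
--         ltri.append(row)
--     return ltri
-- ===== SOURCE B (Python) =====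
-- def l_tri(A):
--     p = len(A[0])
--     return [list(r[:min(i + 1, p)]) + [0] * (p - min(i + 1, p))
--             for i, r in enumerate(A)]
-- ===== Notes on version B (the rewrite author's own statement) =====
-- stated objective: simpler
-- what changed: Replaces the per-element inner loop with an if-branch by a single prefix slice of each row up to the diagonal plus zero padding, built in one comprehension over enumerate(A).
import Mathlib
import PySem

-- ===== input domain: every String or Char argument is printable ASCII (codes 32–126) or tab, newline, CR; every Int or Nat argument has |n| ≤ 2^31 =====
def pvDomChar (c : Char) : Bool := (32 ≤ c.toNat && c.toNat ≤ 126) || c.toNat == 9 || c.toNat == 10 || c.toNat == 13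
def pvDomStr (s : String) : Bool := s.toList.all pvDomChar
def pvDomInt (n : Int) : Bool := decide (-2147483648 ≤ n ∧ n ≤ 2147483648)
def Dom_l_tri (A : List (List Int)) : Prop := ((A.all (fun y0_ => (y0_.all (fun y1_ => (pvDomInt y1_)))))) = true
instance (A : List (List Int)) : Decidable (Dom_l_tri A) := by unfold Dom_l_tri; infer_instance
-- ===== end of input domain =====

-- B builds each output row as a prefix slice of the original row plus zero padding
-- (one comprehension) instead of A's per-element inner loop with a branch: simpler.


-- ===== PORT A =====
def l_tri (A : List (List Int)) : List (List Int) :=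
  let n : Int := A.length
  let p : Int := (PySem.List.pyGetD A 0 []).length
  (PySem.List.pyRange 0 n 1).foldl
    (fun ltri i =>
      let row := (PySem.List.pyRange 0 p 1).foldl
        (fun row j =>
          if i < j then row ++ [(0 : Int)]
          else row ++ [PySem.List.pyGetD (PySem.List.pyGetD A i []) j 0]) []
      ltri ++ [row]) []

-- ===== PORT B =====
def l_tri_alt (A : List (List Int)) : List (List Int) :=
  let p : Int := (PySem.List.pyGetD A 0 []).length
  (PySem.List.enumerate A).map (fun ir =>
    let k : Int := min (ir.1 + 1) p
    PySem.List.slice ir.2 none (some k) ++ List.replicate (p - k).toNat (0 : Int))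

-- ===== PRECONDITION & SPEC =====
-- Pre_ excludes exactly the inputs where Python A raises: the empty matrix
-- (len(A[0]) IndexError) and ragged matrices whose row i is shorter than the
-- min(i+1, len(A[0])) entries the inner loop reads (IndexError on A[i][j]).
def Pre_l_tri (A : List (List Int)) : Prop :=
  A ≠ [] ∧ ∀ i ∈ List.range A.length,
    min (i + 1) (A.headD []).length ≤ (A.getD i []).length
instance (A : List (List Int)) : Decidable (Pre_l_tri A) := by unfold Pre_l_tri; infer_instance
def pvWitness_l_tri : List (List Int) := [[1, 2], [3, 4]]
def Spec_l_tri (A : List (List Int)) (out : List (List Int)) : Prop := out = l_tri_alt A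
instance (A : List (List Int)) (out : List (List Int)) : Decidable (Spec_l_tri A out) := by unfold Spec_l_tri; infer_instance

-- ===== CLAIM (what is proved, stated in full; the proofs are below) =====
def Claim_equal_l_tri : Prop := ∀ (A : List (List Int)), Dom_l_tri A → Pre_l_tri A → Spec_l_tri A (l_tri A)

-- ===== LEMMAS AND PROOFS =====

-- index form of PySem.List.enumerate
theorem getElem_enumerate {α : Type} (xs : List α) (s : Int) (i : Nat) (h : i < xs.length)
    (h' : i < (PySem.List.enumerate xs s).length) :
    (PySem.List.enumerate xs s)[i] = (s + i, xs[i]) := by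
  induction xs generalizing s i with
  | nil => simp at h
  | cons x xs ih =>
    cases i with
    | zero => simp [PySem.List.enumerate_cons]
    | succ i =>
      have hi : i < xs.length := by simpa using Nat.lt_of_succ_lt_succ h
      have := ih (s + 1) i hi (by simpa [PySem.List.length_enumerate] using hi)
      simp only [PySem.List.enumerate_cons, List.getElem_cons_succ, this]
      congr 1
      push_cast; ring

-- one row: A's element-wise loop equals B's slice-and-pad, given the row is long enough
theorem row_eq (r : List Int) (i p : Nat) (hlen : min (i + 1) p ≤ r.length) :
    (PySem.List.pyRange 0 (p : Int) 1).foldl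
      (fun row j =>
        if (i : Int) < j then row ++ [(0 : Int)]
        else row ++ [PySem.List.pyGetD r j 0]) []
    = PySem.List.slice r none (some (min ((i : Int) + 1) (p : Int)))
      ++ List.replicate (((p : Int) - min ((i : Int) + 1) (p : Int))).toNat (0 : Int) := by
  have hbody : (fun (row : List Int) (j : Int) =>
        if (i : Int) < j then row ++ [(0 : Int)]
        else row ++ [PySem.List.pyGetD r j 0])
      = fun row j => row ++ [if (i : Int) < j then (0 : Int) else PySem.List.pyGetD r j 0] := by
    funext row j; split <;> rfl
  rw [hbody, PySem.List.foldl_append_singleton_eq_map, List.nil_append]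
  have hk : min ((i : Int) + 1) (p : Int) = ((min (i + 1) p : Nat) : Int) := by push_cast; rfl
  rw [hk, PySem.List.slice_to_natCast]
  set k : Nat := min (i + 1) p with hkdef
  have hkr : k ≤ r.length := hlen
  have hkp : k ≤ p := by omega
  have hcast : (((p : Int) - ((k : Nat) : Int)).toNat) = p - k := by omega
  rw [hcast]
  apply List.ext_getElem
  · simp [PySem.List.length_pyRange_one]; omega
  · intro m hm1 hm2
    simp only [List.length_map, PySem.List.length_pyRange_one] at hm1
    have hmp : m < p := by omega
    rw [List.getElem_map, PySem.List.getElem_pyRange_one]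
    simp only [zero_add]
    by_cases hmi : m < k
    · have hne : ¬ ((i : Int) < (m : Int)) := by omega
      rw [if_neg hne]
      have hmr : m < r.length := lt_of_lt_of_le hmi hkr
      have hml : m < (r.take k).length := by simp; omega
      rw [List.getElem_append_left hml, PySem.List.pyGetD_natCast,
          List.getElem_take, List.getD_eq_getElem]
    · have hgt : (i : Int) < (m : Int) := by omega
      rw [if_pos hgt]
      have hle : (r.take k).length ≤ m := by simp; omega
      rw [List.getElem_append_right hle, List.getElem_replicate]

theorem l_tri_spec : Claim_equal_l_tri := by
  intro A _hD hPre
  obtain ⟨hne, hrows⟩ := hPre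
  unfold Spec_l_tri l_tri l_tri_alt
  have hp0 : PySem.List.pyGetD A 0 [] = A.headD [] := by
    cases A with
    | nil => simp at hne
    | cons a as => simp [PySem.List.pyGetD_zero_cons]
  rw [hp0]
  set p : Nat := (A.headD []).length with hpdef
  rw [PySem.List.foldl_append_singleton_eq_map, List.nil_append]
  apply List.ext_getElem
  · simp [PySem.List.length_pyRange_one, PySem.List.length_enumerate]
  · intro m hm1 hm2
    simp only [List.length_map, PySem.List.length_pyRange_one] at hm1
    have hmA : m < A.length := by omega
    rw [List.getElem_map, List.getElem_map, PySem.List.getElem_pyRange_one,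
        getElem_enumerate A 0 m hmA (by simpa [PySem.List.length_enumerate] using hmA)]
    simp only [zero_add]
    have hget : A.getD m [] = A[m] := List.getD_eq_getElem A [] hmA
    simp only [PySem.List.pyGetD_natCast, hget]
    have hr := hrows m (List.mem_range.mpr hmA)
    rw [hget] at hr
    exact row_eq A[m] m p hr
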